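-- pv_equiv track=rewrite | github.com/joshdev1/PracticalEmergence | format_ca_data.py | get_potentials_and_ca_ovlps
-- ===== SOURCE A (Python) =====
-- def get_potentials_and_ca_ovlps(data):
--     raw_potentials = []
--     raw_ca1_ovlps = []
--     for line in range(len(data)):
--         if line % 2 == 0:
--             raw_potentials.append(data[line].strip())
--         else:
--             raw_ca1_ovlps.append(data[line].strip())
--     return raw_potentials, raw_ca1_ovlps
-- ===== SOURCE B (Python) =====
-- def get_potentials_and_ca_ovlps(data):
--     raw_potentials = []
--     raw_ca1_ovlps = []
--     it = iter(data)
--     for first in it: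
--         raw_potentials.append(first.strip())
--         second = next(it, None)
--         if second is not None:
--             raw_ca1_ovlps.append(second.strip())
--     return raw_potentials, raw_ca1_ovlps
-- ===== Notes on version B (the rewrite author's own statement) =====
-- stated objective: simpler
-- what changed: Replaces the indexed range(len(data)) loop with a %2 parity branch by a single iterator pass that consumes the lines two at a time (first to potentials, second to overlaps), eliminating the index and the parity test.
import Mathlib
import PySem

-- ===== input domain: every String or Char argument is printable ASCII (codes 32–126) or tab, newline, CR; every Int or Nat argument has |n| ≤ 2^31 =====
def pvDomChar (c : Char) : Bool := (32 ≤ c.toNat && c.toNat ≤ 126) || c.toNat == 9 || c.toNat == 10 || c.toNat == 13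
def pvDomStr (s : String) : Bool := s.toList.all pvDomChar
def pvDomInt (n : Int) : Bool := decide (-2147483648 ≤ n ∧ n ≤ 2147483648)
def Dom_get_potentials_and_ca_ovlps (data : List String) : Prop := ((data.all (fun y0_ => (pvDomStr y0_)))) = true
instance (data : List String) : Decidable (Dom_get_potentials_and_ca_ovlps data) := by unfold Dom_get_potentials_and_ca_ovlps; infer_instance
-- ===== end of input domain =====

-- ===== PORT A =====
def get_potentials_and_ca_ovlps (data : List String) : List String × List String :=
  (PySem.List.pyRange 0 data.length 1).foldl
    (fun acc line =>
      if PySem.Int.mod line 2 == 0 then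
        (acc.1 ++ [PySem.Str.strip (PySem.List.pyGetD data line "")], acc.2)
      else
        (acc.1, acc.2 ++ [PySem.Str.strip (PySem.List.pyGetD data line "")]))
    ([], [])

-- ===== PORT B =====
-- one pass consuming the lines two at a time (mirrors Source B's iterator loop)
def gpaco_go : List String → List String × List String
  | [] => ([], [])
  | [a] => ([PySem.Str.strip a], [])
  | a :: b :: rest =>
    let r := gpaco_go rest
    (PySem.Str.strip a :: r.1, PySem.Str.strip b :: r.2)

def get_potentials_and_ca_ovlps_alt (data : List String) : List String × List String :=
  gpaco_go data

-- ===== PRECONDITION & SPEC =====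
def Spec_get_potentials_and_ca_ovlps (data : List String) (out : List String × List String) : Prop := out = get_potentials_and_ca_ovlps_alt data
instance (data : List String) (out : List String × List String) : Decidable (Spec_get_potentials_and_ca_ovlps data out) := by unfold Spec_get_potentials_and_ca_ovlps; infer_instance

-- ===== CLAIM (what is proved, stated in full; the proofs are below) =====
def Claim_equal_get_potentials_and_ca_ovlps : Prop := ∀ (data : List String), Dom_get_potentials_and_ca_ovlps data → Spec_get_potentials_and_ca_ovlps data (get_potentials_and_ca_ovlps data)

-- ===== LEMMAS AND PROOFS =====

-- ===== VERDICT (by name: the statement is the Claim_ definition above) =====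
theorem pymod_two (s : Int) : PySem.Int.mod s 2 = s % 2 := by
  simp [PySem.Int.mod, Int.fmod_eq_emod]

def gpacoBody (acc : List String × List String) (jx : Int × String) : List String × List String :=
  if PySem.Int.mod jx.1 2 == 0 then (acc.1 ++ [PySem.Str.strip jx.2], acc.2)
  else (acc.1, acc.2 ++ [PySem.Str.strip jx.2])

theorem gpaco_enum (data : List String) : ∀ (s : Int) (p o : List String),
    PySem.Int.mod s 2 = 0 →
    (PySem.List.enumerate data s).foldl gpacoBody (p, o)
      = (p ++ (gpaco_go data).1, o ++ (gpaco_go data).2) := by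
  induction data using gpaco_go.induct with
  | case1 => intro s p o _; simp [PySem.List.enumerate, gpaco_go]
  | case2 a =>
    intro s p o hs
    rw [pymod_two] at hs
    simp [PySem.List.enumerate, gpaco_go, gpacoBody]
    omega
  | case3 a b rest ih =>
    intro s p o hs
    rw [pymod_two] at hs
    have h1 : (s + 1) % 2 = 1 := by omega
    simp only [PySem.List.enumerate, List.foldl_cons]
    rw [show gpacoBody (p, o) (s, a) = (p ++ [PySem.Str.strip a], o) by
          simp [gpacoBody, hs],
        show gpacoBody (p ++ [PySem.Str.strip a], o) (s + 1, b)
            = (p ++ [PySem.Str.strip a], o ++ [PySem.Str.strip b]) by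
          simp [gpacoBody, h1],
        ih (s + 1 + 1) _ _ (by rw [pymod_two]; omega)]
    simp [gpaco_go]

theorem gpaco_A_eq_enum (data : List String) :
    get_potentials_and_ca_ovlps data
      = (PySem.List.enumerate data 0).foldl gpacoBody ([], []) := by
  rw [PySem.List.enumerate_eq_map_pyRange data ""]
  rw [List.foldl_map]
  rfl

theorem get_potentials_and_ca_ovlps_spec : Claim_equal_get_potentials_and_ca_ovlps := by
  intro data _
  unfold Spec_get_potentials_and_ca_ovlps get_potentials_and_ca_ovlps_alt
  rw [gpaco_A_eq_enum, gpaco_enum data 0 [] [] (by decide)]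
  simp
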